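-- pv_equiv track=rewrite | github.com/pypi-data/pypi-mirror-384 | packages/incept-eval/incept_eval-2.1.0.tar.gz/incept_eval-2.1.0/incept_eval/submodules/incept-multilingual-generation/src/wolfram/solve.py | _find_pod_by_titles
-- ===== SOURCE A (Python) =====
-- from typing import Optional, List, Tuple
--
-- def _find_pod_by_titles(pods: List[dict], titles: List[str]) -> Optional[dict]:
--     wanted = {t.lower() for t in titles}
--     for pod in pods:
--         t = (pod.get("title") or pod.get("id") or "").lower()
--         if t in wanted:
--             return pod
--     # fallback: substring match
--     for pod in pods:
--         t = (pod.get("title") or pod.get("id") or "").lower()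
--         if any(w in t for w in wanted):
--             return pod
--     return None
-- ===== SOURCE B (Python) =====
-- from typing import Optional, List
--
-- def _find_pod_by_titles(pods: List[dict], titles: List[str]) -> Optional[dict]:
--     wanted = {t.lower() for t in titles}
--     fallback = None
--     for pod in pods:
--         t = (pod.get("title") or pod.get("id") or "").lower()
--         if t in wanted:
--             return pod
--         if fallback is None and any(w in t for w in wanted):
--             fallback = pod
--     return fallback
-- ===== Notes on version B (the rewrite author's own statement) =====
-- stated objective: alternative
-- what changed: Replaces A's two full passes over pods (an exact-match pass, then a substring pass) by a single forward pass that returns immediately on an exact match and records the first substring match in a fallback variable returned at the end.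
import Mathlib
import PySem

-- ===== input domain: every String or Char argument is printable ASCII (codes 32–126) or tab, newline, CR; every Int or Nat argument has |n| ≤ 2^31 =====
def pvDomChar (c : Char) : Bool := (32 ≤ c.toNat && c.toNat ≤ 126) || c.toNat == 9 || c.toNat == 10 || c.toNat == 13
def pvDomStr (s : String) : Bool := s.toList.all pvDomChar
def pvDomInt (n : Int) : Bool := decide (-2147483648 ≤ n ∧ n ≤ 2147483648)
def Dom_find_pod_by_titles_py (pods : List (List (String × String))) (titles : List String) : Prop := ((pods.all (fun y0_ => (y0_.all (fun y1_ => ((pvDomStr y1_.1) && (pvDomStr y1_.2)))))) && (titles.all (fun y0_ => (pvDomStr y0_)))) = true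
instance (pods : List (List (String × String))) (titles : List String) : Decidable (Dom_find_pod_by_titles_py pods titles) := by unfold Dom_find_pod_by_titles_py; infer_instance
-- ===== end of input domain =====

-- B replaces A's two full passes over pods (exact pass, then substring pass) by one forward pass
-- that returns on the first exact match and records the first substring match as a fallback (objective: alternative).


-- shared helper: Python's '(pod.get("title") or pod.get("id") or "").lower()', the identical
-- line in both sources ('x or y' on strings: None and "" are falsy)
def pvOrStr (x : Option String) (y : String) : String :=
  match x with
  | some s => if s = "" then y else s
  | none => y

def pvPodKey (pod : List (String × String)) : String :=
  PySem.Str.lower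
    (pvOrStr ((PySem.Dict.mk pod).get? "title")
      (pvOrStr ((PySem.Dict.mk pod).get? "id") ""))

-- ===== PORT A =====
-- first loop: 'for pod in pods: if t in wanted: return pod'
def pvAExact (wanted : PySem.Set String) : List (List (String × String)) → Option (List (String × String))
  | [] => none
  | pod :: rest =>
    if PySem.Set.contains wanted (pvPodKey pod) then some pod else pvAExact wanted rest

-- second loop: 'for pod in pods: if any(w in t for w in wanted): return pod'
def pvASub (wanted : PySem.Set String) : List (List (String × String)) → Option (List (String × String))
  | [] => none
  | pod :: rest =>
    if wanted.any (fun w => PySem.Str.isIn w (pvPodKey pod)) then some pod else pvASub wanted rest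

def find_pod_by_titles_py (pods : List (List (String × String))) (titles : List String) : Option (List (String × String)) :=
  let wanted : PySem.Set String := PySem.Set.ofList (titles.map PySem.Str.lower)
  match pvAExact wanted pods with
  | some pod => some pod
  | none => pvASub wanted pods

-- ===== PORT B =====
-- single pass with fallback accumulator (Source B's loop; 'fallback' is the second argument)
def pvBLoop (wanted : PySem.Set String) : List (List (String × String)) → Option (List (String × String)) → Option (List (String × String))
  | [], fb => fb
  | pod :: rest, fb =>
    let t := pvPodKey pod
    if PySem.Set.contains wanted t then some pod
    else pvBLoop wanted rest
      (if fb.isNone && wanted.any (fun w => PySem.Str.isIn w t) then some pod else fb)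

def find_pod_by_titles_py_alt (pods : List (List (String × String))) (titles : List String) : Option (List (String × String)) :=
  pvBLoop (PySem.Set.ofList (titles.map PySem.Str.lower)) pods none

-- ===== PRECONDITION & SPEC =====
def Spec_find_pod_by_titles_py (pods : List (List (String × String))) (titles : List String) (out : Option (List (String × String))) : Prop := out = find_pod_by_titles_py_alt pods titles
instance (pods : List (List (String × String))) (titles : List String) (out : Option (List (String × String))) : Decidable (Spec_find_pod_by_titles_py pods titles out) := by unfold Spec_find_pod_by_titles_py; infer_instance

-- ===== CLAIM (what is proved, stated in full; the proofs are below) =====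
def Claim_equal_find_pod_by_titles_py : Prop := ∀ (pods : List (List (String × String))) (titles : List String), Dom_find_pod_by_titles_py pods titles → Spec_find_pod_by_titles_py pods titles (find_pod_by_titles_py pods titles)

-- ===== LEMMAS AND PROOFS =====

-- if A's exact loop hits, B's pass returns that pod whatever the fallback holds
theorem pv_b_of_exact (W : List String) (l : List (List (String × String)))
    (fb : Option (List (String × String))) (q : List (String × String))
    (h : pvAExact (PySem.Set.ofList W) l = some q) :
    pvBLoop (PySem.Set.ofList W) l fb = some q := by
  induction l generalizing fb with
  | nil => simp [pvAExact] at h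
  | cons pod rest ih =>
    by_cases hm : pvPodKey pod ∈ W
    · simp [pvAExact, hm] at h
      subst h
      simp [pvBLoop, hm]
    · simp [pvAExact, hm] at h
      simp [pvBLoop, hm]
      exact ih _ h

-- if A's exact loop misses everywhere, B's pass returns its fallback, else A's substring loop
theorem pv_b_of_no_exact (W : List String) (l : List (List (String × String)))
    (fb : Option (List (String × String)))
    (h : pvAExact (PySem.Set.ofList W) l = none) :
    pvBLoop (PySem.Set.ofList W) l fb = (match fb with
      | some q => some q
      | none => pvASub (PySem.Set.ofList W) l) := by
  induction l generalizing fb with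
  | nil => cases fb <;> simp [pvBLoop, pvASub]
  | cons pod rest ih =>
    by_cases hm : pvPodKey pod ∈ W
    · simp [pvAExact, hm] at h
    · simp [pvAExact, hm] at h
      cases fb with
      | some q =>
        have hr := ih (some q) h
        simp at hr
        simp [pvBLoop, hm]
        exact hr
      | none =>
        by_cases hs : ∃ x ∈ W, PySem.Chars.isIn x.toList (pvPodKey pod).toList = true
        · simpa [pvBLoop, pvASub, hm, hs] using ih (some pod) h
        · simpa [pvBLoop, pvASub, hm, hs] using ih none h

-- ===== VERDICT (by name: the statement is the Claim_ definition above) =====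
theorem find_pod_by_titles_py_spec : Claim_equal_find_pod_by_titles_py := by
  intro pods titles _
  simp only [Spec_find_pod_by_titles_py, find_pod_by_titles_py, find_pod_by_titles_py_alt]
  cases h : pvAExact (PySem.Set.ofList (titles.map PySem.Str.lower)) pods with
  | some q =>
    exact (pv_b_of_exact _ pods none q h).symm
  | none =>
    exact (pv_b_of_no_exact (titles.map PySem.Str.lower) pods none h).symm
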